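-- pv_equiv track=rewrite | github.com/virt-manager/virt-manager | virtinst/devices/disk.py | target_to_num
-- ===== SOURCE A (Python) =====
-- def target_to_num(tgt):
--     """
--     Convert disk /dev number (like hda, hdb, hdaa, etc.) to an index
--     """
--     num = 0
--     k = 0
--     if tgt[0] == 'x':
--         # This case is here for 'xvda'
--         tgt = tgt[1:]
--     for i, c in enumerate(reversed(tgt[2:])):
--         if i != 0:
--             k = 1
--         num += (ord(c) - ord('a') + k) * (26 ** i)
--     return num
-- ===== SOURCE B (Python) =====
-- def target_to_num(tgt):
--     if tgt[0] == 'x':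
--         tgt = tgt[1:]
--     s = tgt[2:]
--     num = 0
--     for c in s[:-1]:
--         num = num * 26 + (ord(c) - ord('a') + 1)
--     if s:
--         num = num * 26 + (ord(s[-1]) - ord('a'))
--     return num
-- ===== Notes on version B (the rewrite author's own statement) =====
-- stated objective: faster
-- what changed: Replaces the reversed enumerate loop with explicit 26**i powers and the k flag by a forward Horner pass: +1 digits over s[:-1] via num = num*26 + digit, then the last character with offset 0.
import Mathlib
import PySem

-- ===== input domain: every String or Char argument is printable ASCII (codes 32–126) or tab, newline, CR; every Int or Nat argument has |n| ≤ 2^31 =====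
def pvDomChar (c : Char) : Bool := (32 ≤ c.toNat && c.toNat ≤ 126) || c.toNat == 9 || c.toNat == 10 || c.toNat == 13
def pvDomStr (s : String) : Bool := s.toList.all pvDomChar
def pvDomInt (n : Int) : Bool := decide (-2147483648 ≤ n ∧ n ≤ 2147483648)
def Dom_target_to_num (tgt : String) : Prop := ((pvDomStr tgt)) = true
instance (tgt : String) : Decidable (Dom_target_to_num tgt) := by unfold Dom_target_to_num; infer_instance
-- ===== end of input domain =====

-- B is the same index computation written as a forward Horner pass instead of a reversed loop with explicit 26^i powers and a k flag.

-- ===== PORT A =====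
-- loop 'for i, c in enumerate(reversed(tgt[2:]))' with state num, k and the running index i
def targetToNumLoopA : List Char → Int → Int → Nat → Int
  | [], num, _, _ => num
  | c :: rest, num, k, i =>
      let k' := if i ≠ 0 then 1 else k
      targetToNumLoopA rest (num + ((c.toNat : Int) - 97 + k') * 26 ^ i) k' (i + 1)

def target_to_num (tgt : String) : Int :=
  let t := tgt.toList
  -- 'tgt[0]' raises IndexError on the empty string: excluded by Pre_target_to_num
  let t := if t.head? = some 'x' then t.drop 1 else t
  targetToNumLoopA (t.drop 2).reverse 0 0 0

-- ===== PORT B =====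
def target_to_num_alt (tgt : String) : Int :=
  let t := tgt.toList
  let t := if t.head? = some 'x' then t.drop 1 else t
  let s := t.drop 2
  let num := s.dropLast.foldl (fun n c => n * 26 + ((c.toNat : Int) - 97 + 1)) 0
  match s.getLast? with
  | none => num
  | some c => num * 26 + ((c.toNat : Int) - 97)

-- ===== PRECONDITION & SPEC =====
-- Pre_ excludes only the empty string, on which A raises IndexError at tgt[0] (B raises there too).
def Pre_target_to_num (tgt : String) : Prop := tgt.toList ≠ []
instance (tgt : String) : Decidable (Pre_target_to_num tgt) := by unfold Pre_target_to_num; infer_instance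
def pvWitness_target_to_num : String := "hdaa"

def Spec_target_to_num (tgt : String) (out : Int) : Prop := out = target_to_num_alt tgt
instance (tgt : String) (out : Int) : Decidable (Spec_target_to_num tgt out) := by unfold Spec_target_to_num; infer_instance

-- ===== CLAIM (what is proved, stated in full; the proofs are below) =====
def Claim_equal_target_to_num : Prop := ∀ (tgt : String), Dom_target_to_num tgt → Pre_target_to_num tgt → Spec_target_to_num tgt (target_to_num tgt)

-- ===== LEMMAS AND PROOFS =====

-- sum with every digit offset by +1, starting at power i
def sumS : List Char → Nat → Int
  | [], _ => 0
  | c :: r, i => ((c.toNat : Int) - 97 + 1) * 26 ^ i + sumS r (i + 1)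

theorem targetToNumLoopA_one (l : List Char) (num : Int) (i : Nat) :
    targetToNumLoopA l num 1 i = num + sumS l i := by
  induction l generalizing num i with
  | nil => simp [targetToNumLoopA, sumS]
  | cons c r ih =>
    simp only [targetToNumLoopA, sumS]
    split <;> (rw [ih]; ring)

theorem sumS_succ (l : List Char) (i : Nat) :
    sumS l (i + 1) = 26 * sumS l i := by
  induction l generalizing i with
  | nil => simp [sumS]
  | cons c r ih =>
    simp only [sumS, ih, pow_succ]
    ring

theorem sumS_append_singleton (l : List Char) (c : Char) (i : Nat) :
    sumS (l ++ [c]) i = sumS l i + ((c.toNat : Int) - 97 + 1) * 26 ^ (i + l.length) := by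
  induction l generalizing i with
  | nil => simp [sumS]
  | cons d r ih =>
    simp only [List.cons_append, sumS, ih, List.length_cons]
    ring_nf

theorem foldl_horner (l : List Char) (a : Int) :
    l.foldl (fun n c => n * 26 + ((c.toNat : Int) - 97 + 1)) a
      = a * 26 ^ l.length + sumS l.reverse 0 := by
  induction l generalizing a with
  | nil => simp [sumS]
  | cons c r ih =>
    simp only [List.foldl_cons, ih, List.reverse_cons, sumS_append_singleton,
      List.length_reverse, List.length_cons, pow_succ]
    ring

theorem loopA_pos (l : List Char) (num k : Int) (i : Nat) :
    targetToNumLoopA l num k (i + 1) = num + sumS l (i + 1) := by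
  cases l with
  | nil => simp [targetToNumLoopA, sumS]
  | cons c r =>
    simp only [targetToNumLoopA, sumS]
    rw [if_pos (by omega), targetToNumLoopA_one]
    ring

theorem loops_agree (s : List Char) :
    targetToNumLoopA s.reverse 0 0 0 =
      (match s.getLast? with
       | none => s.dropLast.foldl (fun n c => n * 26 + ((c.toNat : Int) - 97 + 1)) 0
       | some c => s.dropLast.foldl (fun n c => n * 26 + ((c.toNat : Int) - 97 + 1)) 0 * 26
            + ((c.toNat : Int) - 97)) := by
  cases h : s.getLast? with
  | none =>
    have : s = [] := List.getLast?_eq_none_iff.mp h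
    subst this
    simp [targetToNumLoopA]
  | some c =>
    have hne : s ≠ [] := by rintro rfl; simp at h
    have hs : s = s.dropLast ++ [c] := by
      conv_lhs => rw [← List.dropLast_append_getLast hne]
      rw [List.getLast?_eq_some_getLast hne, Option.some.injEq] at h
      rw [h]
    conv_lhs => rw [hs]
    rw [List.reverse_append, List.reverse_singleton, List.singleton_append]
    show targetToNumLoopA (c :: s.dropLast.reverse) 0 0 0 = _
    rw [show targetToNumLoopA (c :: s.dropLast.reverse) 0 0 0
        = targetToNumLoopA s.dropLast.reverse (0 + ((c.toNat : Int) - 97 + 0) * 26 ^ 0) 0 (0 + 1) from by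
      simp [targetToNumLoopA]]
    rw [loopA_pos, sumS_succ, foldl_horner]
    simp only [List.reverse_reverse]
    ring

-- ===== VERDICT (by name: the statement is the Claim_ definition above) =====
theorem target_to_num_spec : Claim_equal_target_to_num := by
  intro tgt _ _
  unfold Spec_target_to_num target_to_num target_to_num_alt
  exact loops_agree _
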